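-- pv_equiv track=rewrite | github.com/KDE/pology | pology/colors.py | _resolve_xml_ents
-- ===== SOURCE A (Python) =====
-- _xml_entities = {
--     "lt": "<",
--     "gt": ">",
--     "apos": "'",
--     "quot": "\"",
--     "amp": "&",
-- }
--
-- def _resolve_xml_ents (text):
--
--     segs = []
--     p = 0
--     while True:
--         p1 = p
--         p = text.find("&", p1)
--         if p < 0:
--             segs.append(text[p1:])
--             break
--         segs.append(text[p1:p])
--         p2 = p
--         p = text.find(";", p2)
--         if p < 0:
--             segs.append(text[p2:])
--             break
--         ent = text[p2 + 1:p]
--         val = _xml_entities.get(ent)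
--         if val is None:
--             segs.append(text[p2])
--             p = p2 + 1
--         else:
--             segs.append(val)
--             p += 1
--     rtext = "".join(segs)
--     return rtext
-- ===== SOURCE B (Python) =====
-- import re
--
-- _xml_entities = {
--     "lt": "<",
--     "gt": ">",
--     "apos": "'",
--     "quot": "\"",
--     "amp": "&",
-- }
--
-- _xml_ent_rx = re.compile(r"&(lt|gt|apos|quot|amp);")
--
-- def _resolve_xml_ents (text):
--     return _xml_ent_rx.sub(lambda m: _xml_entities[m.group(1)], text)
-- ===== Notes on version B (the rewrite author's own statement) =====
-- stated objective: idiomatic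
-- what changed: Replaced the manual find-based pointer scanner (explicit p/p1/p2 indices, slice bookkeeping and a segs list) with a single compiled-regex re.sub over the input whose replacement function looks up the matched entity name.
import Mathlib
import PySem

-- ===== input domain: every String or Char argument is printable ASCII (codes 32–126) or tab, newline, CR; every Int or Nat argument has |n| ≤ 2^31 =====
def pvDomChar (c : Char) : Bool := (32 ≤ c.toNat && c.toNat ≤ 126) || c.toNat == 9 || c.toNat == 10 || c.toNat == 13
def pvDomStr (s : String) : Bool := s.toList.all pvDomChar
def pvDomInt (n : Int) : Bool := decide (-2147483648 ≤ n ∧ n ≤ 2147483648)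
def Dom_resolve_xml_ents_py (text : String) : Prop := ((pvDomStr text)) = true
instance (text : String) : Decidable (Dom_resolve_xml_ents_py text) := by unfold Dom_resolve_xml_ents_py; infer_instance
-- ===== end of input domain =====

-- B replaces A's manual find-based pointer scanner with one regex substitution (re.sub over
-- the compiled pattern `&(lt|gt|apos|quot|amp);`): same values, more idiomatic.


-- ===== PORT A =====
-- the module constant _xml_entities
def pvXmlEntities : PySem.Dict (List Char) (List Char) :=
  PySem.Dict.ofList [("lt".toList, "<".toList), ("gt".toList, ">".toList),
                     ("apos".toList, "'".toList), ("quot".toList, "\"".toList),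
                     ("amp".toList, "&".toList)]

-- text.find(c, p) for a single character c (thin wrapper over the PySem primitive)
def pvFind (l : List Char) (c : Char) (p : Int) : Int :=
  PySem.Chars.findFrom l [c] p none

-- A's while-loop over the pointer p; returns the segs accumulated from loop state p.
-- fuel only bounds the iteration count (p grows strictly and stays ≤ len(text), so
-- len(text)+1 iterations always suffice and the 0-fuel branch is never reached).
def pvLoopA (fuel : Nat) (l : List Char) (p : Nat) : List (List Char) :=
  match fuel with
  | 0 => []
  | fuel + 1 =>
    -- p = text.find("&", p1)
    if pvFind l '&' (p : Int) < 0 then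
      [PySem.List.slice l (some (p : Int)) none]               -- segs.append(text[p1:]); break
    else
      -- p = text.find(";", p2)
      if pvFind l ';' (((pvFind l '&' (p : Int)).toNat : Nat) : Int) < 0 then
        -- segs.append(text[p1:p]); segs.append(text[p2:]); break
        [PySem.List.slice l (some (p : Int)) (some ((pvFind l '&' (p : Int)).toNat : Int)),
         PySem.List.slice l (some ((pvFind l '&' (p : Int)).toNat : Int)) none]
      else
        -- ent = text[p2+1:p]; val = _xml_entities.get(ent)
        match pvXmlEntities.get? (PySem.List.slice l
                (some (((pvFind l '&' (p : Int)).toNat + 1 : Nat) : Int))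
                (some ((pvFind l ';' (((pvFind l '&' (p : Int)).toNat : Nat) : Int)).toNat : Int))) with
        | none   =>
          -- segs.append(text[p1:p]); segs.append(text[p2]); p = p2 + 1
          -- (text[p2] can never raise here — p2 is a found index — so the total pyGetD is exact)
          PySem.List.slice l (some (p : Int)) (some ((pvFind l '&' (p : Int)).toNat : Int))
            :: [PySem.List.pyGetD l ((pvFind l '&' (p : Int)).toNat : Int) ' ']
            :: pvLoopA fuel l ((pvFind l '&' (p : Int)).toNat + 1)
        | some v =>
          -- segs.append(text[p1:p]); segs.append(val); p += 1
          PySem.List.slice l (some (p : Int)) (some ((pvFind l '&' (p : Int)).toNat : Int))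
            :: v
            :: pvLoopA fuel l ((pvFind l ';' (((pvFind l '&' (p : Int)).toNat : Nat) : Int)).toNat + 1)

def resolve_xml_ents_py (text : String) : String :=
  String.ofList (pvLoopA (text.toList.length + 1) text.toList 0).flatten  -- rtext = "".join(segs)

-- ===== PORT B =====
-- hand port of the compiled regex `&(lt|gt|apos|quot|amp);` (alternatives in source order)
def pvEntAlts : List (List Char × List Char) :=
  [("lt".toList, "<".toList), ("gt".toList, ">".toList),
   ("apos".toList, "'".toList), ("quot".toList, "\"".toList),
   ("amp".toList, "&".toList)]

-- after a '&': first alternative whose name followed by ';' is a prefix → (replacement, chars consumed)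
def pvTryEnt (cs : List Char) : Option (List Char × Nat) :=
  (pvEntAlts.find? (fun kv => (kv.1 ++ [';']).isPrefixOf cs)).map (fun kv => (kv.2, kv.1.length + 1))

-- re.sub's scan: leftmost match (the pattern can only start at '&'), non-overlapping,
-- replacement text is not rescanned; unmatched characters are copied.  fuel only bounds
-- the iteration count (each step consumes at least one character, so len(text) suffices).
def pvSub (fuel : Nat) (cs : List Char) : List Char :=
  match fuel, cs with
  | _, [] => []
  | 0, _ => []
  | fuel + 1, c :: rest =>
    if c = '&' then
      match pvTryEnt rest with
      | some (v, n) => v ++ pvSub fuel (rest.drop n)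
      | none => '&' :: pvSub fuel rest
    else c :: pvSub fuel rest

def resolve_xml_ents_py_alt (text : String) : String :=
  String.ofList (pvSub text.toList.length text.toList)

-- ===== PRECONDITION & SPEC =====
def Spec_resolve_xml_ents_py (text : String) (out : String) : Prop := out = resolve_xml_ents_py_alt text
instance (text : String) (out : String) : Decidable (Spec_resolve_xml_ents_py text out) := by unfold Spec_resolve_xml_ents_py; infer_instance

-- ===== CLAIM (what is proved, stated in full; the proofs are below) =====
def Claim_equal_resolve_xml_ents_py : Prop := ∀ (text : String), Dom_resolve_xml_ents_py text → Spec_resolve_xml_ents_py text (resolve_xml_ents_py text)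

-- ===== LEMMAS AND PROOFS =====

-- glue: a one-character prefix / infix
theorem pv_single_prefix_iff (a : Char) (xs : List Char) : [a] <+: xs ↔ xs.head? = some a := by
  cases xs <;> simp [List.cons_prefix_cons, eq_comm]

theorem pv_mem_iff_single_infix (a : Char) (xs : List Char) : a ∈ xs ↔ [a] <:+: xs := by
  constructor
  · intro h
    obtain ⟨s, t, rfl⟩ := List.append_of_mem h
    exact ⟨s, t, by simp⟩
  · intro h
    exact h.subset (by simp)

-- what a successful single-character find means
theorem pv_findFrom_pos (l : List Char) (c : Char) (p : Nat) (hp : p ≤ l.length)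
    (h : ¬ pvFind l c (p : Int) < 0) :
    p ≤ (pvFind l c (p : Int)).toNat ∧
    (pvFind l c (p : Int)).toNat < l.length ∧
    l[(pvFind l c (p : Int)).toNat]? = some c ∧
    ∀ i, p ≤ i → i < (pvFind l c (p : Int)).toNat → l[i]? ≠ some c := by
  unfold pvFind at *
  obtain ⟨h1, h2, h3⟩ := PySem.Chars.findFrom_natCast_spec l [c] p hp (by omega)
  have hr1 : p ≤ (PySem.Chars.findFrom l [c] (p : Int) none).toNat := by omega
  rw [pv_single_prefix_iff, List.head?_drop] at h2
  have hr2 : (PySem.Chars.findFrom l [c] (p : Int) none).toNat < l.length := by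
    have h4 := h2
    rw [List.getElem?_eq_some_iff] at h4
    obtain ⟨hlt, -⟩ := h4
    exact hlt
  refine ⟨hr1, hr2, h2, ?_⟩
  intro i hpi hir hcontra
  exact h3 i hpi hir (by rw [pv_single_prefix_iff, List.head?_drop]; exact hcontra)

-- what a failed single-character find means
theorem pv_findFrom_neg (l : List Char) (c : Char) (p : Nat) (hp : p ≤ l.length)
    (h : pvFind l c (p : Int) < 0) : c ∉ l.drop p := by
  unfold pvFind at h
  have hne : PySem.Chars.findFrom l [c] (p : Int) none = -1 := by
    rw [PySem.Chars.findFrom_natCast l [c] p hp] at h ⊢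
    by_cases hf : PySem.Chars.find (l.drop p) [c] = -1
    · simp [hf]
    · have h0 := PySem.Chars.neg_one_le_find (l.drop p) [c]
      rw [if_neg hf] at h
      omega
  rw [PySem.Chars.findFrom_natCast_eq_neg_one_iff l [c] p hp] at hne
  rw [pv_mem_iff_single_infix]
  exact hne

-- pvSub computes the same value under any sufficient fuel
theorem pvSub_fuel (f g : Nat) : ∀ cs : List Char, cs.length ≤ f → cs.length ≤ g →
    pvSub f cs = pvSub g cs := by
  induction f generalizing g with
  | zero =>
    intro cs hf _
    have : cs = [] := List.length_eq_zero_iff.mp (by omega)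
    subst this
    cases g <;> rfl
  | succ f ihf =>
    intro cs hf hg
    cases cs with
    | nil => cases g <;> rfl
    | cons c rest =>
      cases g with
      | zero => simp at hg
      | succ g =>
        simp only [List.length_cons] at hf hg
        rw [pvSub, pvSub]
        by_cases hc : c = '&'
        · rw [if_pos hc, if_pos hc]
          cases htry : pvTryEnt rest with
          | none =>
            show '&' :: pvSub f rest = '&' :: pvSub g rest
            rw [ihf g rest (by omega) (by omega)]
          | some vn =>
            obtain ⟨v, n⟩ := vn
            show v ++ pvSub f (rest.drop n) = v ++ pvSub g (rest.drop n)
            rw [ihf g (rest.drop n) (by simp; omega) (by simp; omega)]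
        · rw [if_neg hc, if_neg hc, ihf g rest (by omega) (by omega)]

-- pvSub leaves text without '&' untouched
theorem pvSub_no_amp (f : Nat) : ∀ cs : List Char, cs.length ≤ f → '&' ∉ cs →
    pvSub f cs = cs := by
  induction f with
  | zero =>
    intro cs hf _
    have : cs = [] := List.length_eq_zero_iff.mp (by omega)
    subst this; rfl
  | succ f ih =>
    intro cs hf h
    cases cs with
    | nil => rfl
    | cons c rest =>
      simp only [List.length_cons] at hf
      simp only [List.mem_cons, not_or] at h
      rw [pvSub, if_neg (Ne.symm h.1), ih rest (by omega) h.2]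

-- a successful pvTryEnt consumes a ';'
theorem pvTryEnt_semi (cs : List Char) (h : ';' ∉ cs) : pvTryEnt cs = none := by
  unfold pvTryEnt
  rw [List.find?_eq_none.mpr]
  · rfl
  · intro kv _ hpre
    rw [List.isPrefixOf_iff_prefix] at hpre
    exact h (hpre.subset (by simp))

-- pvSub leaves text without ';' untouched
theorem pvSub_no_semi (f : Nat) : ∀ cs : List Char, cs.length ≤ f → ';' ∉ cs →
    pvSub f cs = cs := by
  induction f with
  | zero =>
    intro cs hf _
    have : cs = [] := List.length_eq_zero_iff.mp (by omega)
    subst this; rfl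
  | succ f ih =>
    intro cs hf h
    cases cs with
    | nil => rfl
    | cons c rest =>
      simp only [List.length_cons] at hf
      simp only [List.mem_cons, not_or] at h
      rw [pvSub]
      by_cases hc : c = '&'
      · rw [if_pos hc, pvTryEnt_semi rest h.2, hc, ih rest (by omega) h.2]
      · rw [if_neg hc, ih rest (by omega) h.2]

-- pvSub commutes with a '&'-free prefix
theorem pvSub_append (f : Nat) : ∀ seg rest : List Char, (seg ++ rest).length ≤ f → '&' ∉ seg →
    pvSub f (seg ++ rest) = seg ++ pvSub rest.length rest := by
  induction f with
  | zero =>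
    intro seg rest hf _
    simp only [List.length_append] at hf
    have h1 : seg = [] := List.length_eq_zero_iff.mp (by omega)
    have h2 : rest = [] := List.length_eq_zero_iff.mp (by omega)
    subst h1; subst h2; rfl
  | succ f ih =>
    intro seg rest hf h
    cases seg with
    | nil =>
      simp only [List.nil_append]
      exact pvSub_fuel _ _ rest (by simpa using hf) le_rfl
    | cons c s =>
      simp only [List.mem_cons, not_or] at h
      simp only [List.cons_append, List.length_cons] at hf ⊢
      rw [pvSub, if_neg (Ne.symm h.1), ih s rest (by simpa using hf) h.2]

-- matching one alternative name against  ent ++ ';' :: rest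
theorem pv_prefix_alt (k ent rest : List Char) (hk : ';' ∉ k) (he : ';' ∉ ent) :
    (k ++ [';']).isPrefixOf (ent ++ ';' :: rest) = (k == ent) := by
  induction k generalizing ent with
  | nil =>
    cases ent with
    | nil => simp
    | cons e ent' =>
      simp only [List.mem_cons, not_or] at he
      simp [List.isPrefixOf, he.1]
  | cons a k' ih =>
    simp only [List.mem_cons, not_or] at hk
    cases ent with
    | nil =>
      have ha : a ≠ ';' := fun hh => hk.1 hh.symm
      simp [List.isPrefixOf, ha]
    | cons e ent' =>
      simp only [List.mem_cons, not_or] at he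
      simp only [List.cons_append, List.isPrefixOf, List.cons_beq_cons]
      rw [ih ent' hk.2 he.2]

-- the regex's alternative matching agrees with the dict lookup of the name
theorem pvTryEnt_eq_get (ent rest : List Char) (he : ';' ∉ ent) :
    pvTryEnt (ent ++ ';' :: rest) =
      (pvXmlEntities.get? ent).map (fun v => (v, ent.length + 1)) := by
  unfold pvTryEnt pvEntAlts
  by_cases h1 : "lt".toList = ent
  · rw [List.find?_cons_of_pos (by
      show (("lt".toList ++ [';']).isPrefixOf (ent ++ ';' :: rest)) = true
      rw [pv_prefix_alt _ _ _ (by decide) he]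
      exact beq_iff_eq.mpr h1)]
    subst h1; rfl
  rw [List.find?_cons_of_neg (by
      show ¬ (("lt".toList ++ [';']).isPrefixOf (ent ++ ';' :: rest)) = true
      rw [pv_prefix_alt _ _ _ (by decide) he]
      simpa using h1)]
  by_cases h2 : "gt".toList = ent
  · rw [List.find?_cons_of_pos (by
      show (("gt".toList ++ [';']).isPrefixOf (ent ++ ';' :: rest)) = true
      rw [pv_prefix_alt _ _ _ (by decide) he]
      exact beq_iff_eq.mpr h2)]
    subst h2; rfl
  rw [List.find?_cons_of_neg (by
      show ¬ (("gt".toList ++ [';']).isPrefixOf (ent ++ ';' :: rest)) = true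
      rw [pv_prefix_alt _ _ _ (by decide) he]
      simpa using h2)]
  by_cases h3 : "apos".toList = ent
  · rw [List.find?_cons_of_pos (by
      show (("apos".toList ++ [';']).isPrefixOf (ent ++ ';' :: rest)) = true
      rw [pv_prefix_alt _ _ _ (by decide) he]
      exact beq_iff_eq.mpr h3)]
    subst h3; rfl
  rw [List.find?_cons_of_neg (by
      show ¬ (("apos".toList ++ [';']).isPrefixOf (ent ++ ';' :: rest)) = true
      rw [pv_prefix_alt _ _ _ (by decide) he]
      simpa using h3)]
  by_cases h4 : "quot".toList = ent
  · rw [List.find?_cons_of_pos (by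
      show (("quot".toList ++ [';']).isPrefixOf (ent ++ ';' :: rest)) = true
      rw [pv_prefix_alt _ _ _ (by decide) he]
      exact beq_iff_eq.mpr h4)]
    subst h4; rfl
  rw [List.find?_cons_of_neg (by
      show ¬ (("quot".toList ++ [';']).isPrefixOf (ent ++ ';' :: rest)) = true
      rw [pv_prefix_alt _ _ _ (by decide) he]
      simpa using h4)]
  by_cases h5 : "amp".toList = ent
  · rw [List.find?_cons_of_pos (by
      show (("amp".toList ++ [';']).isPrefixOf (ent ++ ';' :: rest)) = true
      rw [pv_prefix_alt _ _ _ (by decide) he]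
      exact beq_iff_eq.mpr h5)]
    subst h5; rfl
  rw [List.find?_cons_of_neg (by
      show ¬ (("amp".toList ++ [';']).isPrefixOf (ent ++ ';' :: rest)) = true
      rw [pv_prefix_alt _ _ _ (by decide) he]
      simpa using h5)]
  rw [List.find?_nil]
  have hkeys : pvXmlEntities.keys
      = ["lt".toList, "gt".toList, "apos".toList, "quot".toList, "amp".toList] := by decide
  have hcon : pvXmlEntities.contains ent = false := by
    cases hc : pvXmlEntities.contains ent
    · rfl
    · exfalso
      have hmem := (PySem.Dict.contains_iff_mem_keys pvXmlEntities ent).mp hc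
      rw [hkeys] at hmem
      simp only [List.mem_cons, List.not_mem_nil] at hmem
      rcases hmem with h | h | h | h | h | h
      · exact h1 h.symm
      · exact h2 h.symm
      · exact h3 h.symm
      · exact h4 h.symm
      · exact h5 h.symm
      · exact h
  rw [(PySem.Dict.get?_eq_none_iff_contains pvXmlEntities ent).mpr hcon]
  rfl

-- a character absent from a middle slice, from find's minimality
theorem pv_no_char_slice (l : List Char) (c : Char) (a b : Nat) (hb : b ≤ l.length)
    (h : ∀ i, a ≤ i → i < b → l[i]? ≠ some c) :
    c ∉ PySem.List.slice l (some (a : Int)) (some (b : Int)) := by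
  rw [PySem.List.slice_natCast]
  intro hmem
  obtain ⟨j, hj, hjeq⟩ := List.mem_iff_getElem.mp hmem
  have hj' : j < b - a ∧ j < l.length - a := by
    simpa [Nat.lt_min] using hj
  apply h (a + j) (by omega) (by omega)
  rw [List.getElem?_eq_some_iff]
  refine ⟨by omega, ?_⟩
  rw [← hjeq]
  rw [List.getElem_take, List.getElem_drop]

-- splitting the text at a found character
theorem pv_decomp (l : List Char) (c : Char) (a b : Nat) (hab : a ≤ b) (hb : b < l.length)
    (hc : l[b]? = some c) :
    l.drop a = PySem.List.slice l (some (a : Int)) (some (b : Int)) ++ c :: l.drop (b + 1) := by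
  rw [PySem.List.slice_natCast]
  have hget : l[b] = c := by
    rw [List.getElem?_eq_getElem hb] at hc
    exact Option.some.inj hc
  conv_lhs => rw [← List.take_append_drop (b - a) (l.drop a)]
  rw [List.drop_drop]
  have hba : a + (b - a) = b := by omega
  rw [hba, List.drop_eq_getElem_cons hb, hget]

-- the heart of the equivalence: from any loop state p, A's remaining segments
-- joined equal B's substitution on the remaining text
theorem pvLoopA_eq_aux (f : Nat) : ∀ (l : List Char) (p : Nat), p ≤ l.length →
    l.length - p < f →
    (pvLoopA f l p).flatten = pvSub (l.drop p).length (l.drop p) := by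
  induction f with
  | zero => intro l p _ hn; omega
  | succ f ih =>
    intro l p hp hn
    rw [pvLoopA]
    by_cases hq : pvFind l '&' (p : Int) < 0
    · rw [if_pos hq, PySem.List.slice_from_natCast]
      rw [pvSub_no_amp _ _ le_rfl (pv_findFrom_neg l '&' p hp hq)]
      simp
    · rw [if_neg hq]
      obtain ⟨hq1, hq2, hq3, hq4⟩ := pv_findFrom_pos l '&' p hp hq
      have hsegamp : '&' ∉ PySem.List.slice l (some (p : Int))
          (some ((pvFind l '&' (p : Int)).toNat : Int)) :=
        pv_no_char_slice l '&' p _ (le_of_lt hq2) hq4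
      have hsplit := pv_decomp l '&' p (pvFind l '&' (p : Int)).toNat hq1 hq2 hq3
      have hamp : l[(pvFind l '&' (p : Int)).toNat] = '&' := by
        rw [List.getElem?_eq_getElem hq2] at hq3
        exact Option.some.inj hq3
      by_cases hs : pvFind l ';' (((pvFind l '&' (p : Int)).toNat : Nat) : Int) < 0
      · rw [if_pos hs]
        have hnos := pv_findFrom_neg l ';' (pvFind l '&' (p : Int)).toNat (le_of_lt hq2) hs
        have hnos' : ';' ∉ ('&' :: l.drop ((pvFind l '&' (p : Int)).toNat + 1)) := by
          rw [List.drop_eq_getElem_cons hq2, hamp] at hnos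
          exact hnos
        rw [hsplit, pvSub_append _ _ _ le_rfl hsegamp,
            pvSub_no_semi _ _ le_rfl hnos']
        rw [PySem.List.slice_from_natCast, List.drop_eq_getElem_cons hq2, hamp]
        simp
      · rw [if_neg hs]
        obtain ⟨hs1, hs2, hs3, hs4⟩ :=
          pv_findFrom_pos l ';' (pvFind l '&' (p : Int)).toNat (le_of_lt hq2) hs
        set Q : Nat := (pvFind l '&' (p : Int)).toNat with hQdef
        set S : Nat := (pvFind l ';' ((Q : Nat) : Int)).toNat with hSdef
        have hQS : Q < S := by
          rcases Nat.lt_or_ge Q S with h | h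
          · exact h
          · exfalso
            have heq : S = Q := by omega
            rw [heq, hq3] at hs3
            simp at hs3
        set E : List Char := PySem.List.slice l (some ((Q + 1 : Nat) : Int)) (some (S : Int))
          with hEdef
        have hentne : ';' ∉ E :=
          pv_no_char_slice l ';' (Q + 1) S (le_of_lt hs2)
            (fun i hi1 hi2 => hs4 i (by omega) hi2)
        have hdecomp : l.drop (Q + 1) = E ++ ';' :: l.drop (S + 1) :=
          pv_decomp l ';' (Q + 1) S (by omega) hs2 hs3
        have hgetd : PySem.List.pyGetD l (Q : Int) ' ' = '&' := by
          rw [PySem.List.pyGetD_natCast, List.getD_eq_getElem?_getD, List.getElem?_eq_getElem hq2,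
              hamp, Option.getD_some]
        -- rewrite the right-hand side into  seg ++ pvSub ('&' :: rest)
        rw [hsplit, pvSub_append _ _ _ le_rfl hsegamp]
        rw [List.length_cons, pvSub, if_pos rfl, hdecomp, pvTryEnt_eq_get _ _ hentne]
        rcases hget : pvXmlEntities.get? E with _ | v
        · simp only [Option.map_none]
          simp only [List.flatten_cons]
          rw [hgetd]
          rw [ih l (Q + 1) (by omega) (by omega)]
          rw [hdecomp]
          simp
        · simp only [Option.map_some]
          simp only [List.flatten_cons]
          rw [ih l (S + 1) (by omega) (by omega)]
          rw [List.drop_append, List.drop_eq_nil_of_le (Nat.le_succ _)]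
          have h1 : E.length + 1 - E.length = 1 := by omega
          rw [h1, List.nil_append, List.drop_one, List.tail_cons]
          rw [pvSub_fuel (E ++ ';' :: l.drop (S + 1)).length (l.drop (S + 1)).length
            (l.drop (S + 1)) (by simp only [List.length_append, List.length_cons]; omega) le_rfl]

-- ===== VERDICT (by name: the statement is the Claim_ definition above) =====
theorem resolve_xml_ents_py_spec : Claim_equal_resolve_xml_ents_py := by
  intro text _
  unfold Spec_resolve_xml_ents_py resolve_xml_ents_py resolve_xml_ents_py_alt
  rw [pvLoopA_eq_aux (text.toList.length + 1) text.toList 0 (by omega) (by omega)]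
  simp
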